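-- pv_equiv track=rewrite | github.com/cyohn55/Portfolio | MCP/simple_email_processor.py | is_supported_media_file
-- ===== SOURCE A (Python) =====
-- from typing import Dict, Any, List, Optional, Tuple
--
-- SUPPORTED_IMAGE_EXTENSIONS = ['.jpg', '.jpeg', '.png', '.gif', '.webp', '.svg']
--
-- SUPPORTED_VIDEO_EXTENSIONS = ['.mp4', '.mov', '.avi', '.webm']
--
-- SUPPORTED_AUDIO_EXTENSIONS = ['.mp3', '.wav', '.ogg']
--
-- def is_supported_media_file(filename: str) -> Tuple[bool, str]:
--     """Check if file is supported media and return type"""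
--     filename_lower = filename.lower()
--
--     if any(filename_lower.endswith(ext) for ext in SUPPORTED_IMAGE_EXTENSIONS):
--         return True, 'image'
--     elif any(filename_lower.endswith(ext) for ext in SUPPORTED_VIDEO_EXTENSIONS):
--         return True, 'video'
--     elif any(filename_lower.endswith(ext) for ext in SUPPORTED_AUDIO_EXTENSIONS):
--         return True, 'audio'
--
--     return False, 'unknown'
-- ===== SOURCE B (Python) =====
-- EXT_TO_TYPE = {
--     '.jpg': 'image', '.jpeg': 'image', '.png': 'image', '.gif': 'image',
--     '.webp': 'image', '.svg': 'image',
--     '.mp4': 'video', '.mov': 'video', '.avi': 'video', '.webm': 'video',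
--     '.mp3': 'audio', '.wav': 'audio', '.ogg': 'audio',
-- }
--
-- def is_supported_media_file(filename):
--     """Single backwards scan to the last dot, then one dict lookup."""
--     lower = filename.lower()
--     ext_rev = []
--     for c in reversed(lower):
--         ext_rev.append(c)
--         if c == '.':
--             t = EXT_TO_TYPE.get(''.join(reversed(ext_rev)))
--             return (True, t) if t is not None else (False, 'unknown')
--     return (False, 'unknown')
-- ===== Notes on version B (the rewrite author's own statement) =====
-- stated objective: alternative
-- what changed: Replaces the three any()/endswith scans over 13 extension lists by a single backwards scan to the last dot followed by one dict lookup of the extracted extension.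
import Mathlib
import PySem

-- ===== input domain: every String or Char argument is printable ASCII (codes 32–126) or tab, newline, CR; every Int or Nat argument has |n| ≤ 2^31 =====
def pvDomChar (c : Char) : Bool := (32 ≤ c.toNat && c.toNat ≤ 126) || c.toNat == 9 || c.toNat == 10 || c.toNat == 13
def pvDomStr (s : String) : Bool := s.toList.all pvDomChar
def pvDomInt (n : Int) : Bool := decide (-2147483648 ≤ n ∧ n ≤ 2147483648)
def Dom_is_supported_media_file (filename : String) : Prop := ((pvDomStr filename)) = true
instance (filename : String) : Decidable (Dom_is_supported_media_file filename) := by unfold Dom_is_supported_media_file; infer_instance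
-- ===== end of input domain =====

-- B replaces A's three any()/endswith scans over 13 extension lists by one backwards scan to the last dot plus a single dict lookup (alternative structure).

-- ===== PORT A =====
def pvImageExts : List String := [".jpg", ".jpeg", ".png", ".gif", ".webp", ".svg"]
def pvVideoExts : List String := [".mp4", ".mov", ".avi", ".webm"]
def pvAudioExts : List String := [".mp3", ".wav", ".ogg"]

def is_supported_media_file (filename : String) : Bool × String :=
  let filename_lower := PySem.Str.lower filename
  if pvImageExts.any (fun ext => PySem.Str.endswith filename_lower ext) then (true, "image")
  else if pvVideoExts.any (fun ext => PySem.Str.endswith filename_lower ext) then (true, "video")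
  else if pvAudioExts.any (fun ext => PySem.Str.endswith filename_lower ext) then (true, "audio")
  else (false, "unknown")

-- ===== PORT B =====
-- Source B's EXT_TO_TYPE dict literal
def pvExtToType : PySem.Dict String String := PySem.Dict.mk
  [(".jpg", "image"), (".jpeg", "image"), (".png", "image"), (".gif", "image"),
   (".webp", "image"), (".svg", "image"),
   (".mp4", "video"), (".mov", "video"), (".avi", "video"), (".webm", "video"),
   (".mp3", "audio"), (".wav", "audio"), (".ogg", "audio")]

-- Source B's 'for c in reversed(lower)' loop: acc = the ext string built so far (forward order, without c)
def pvScanRev : List Char → List Char → Bool × String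
  | [], _ => (false, "unknown")
  | c :: rest, acc =>
    let ext := c :: acc
    if c = '.' then
      match pvExtToType.get? (String.ofList ext) with
      | some t => (true, t)
      | none => (false, "unknown")
    else pvScanRev rest ext

def is_supported_media_file_alt (filename : String) : Bool × String :=
  let lower := PySem.Str.lower filename
  pvScanRev lower.toList.reverse []

-- ===== PRECONDITION & SPEC =====
def Spec_is_supported_media_file (filename : String) (out : Bool × String) : Prop := out = is_supported_media_file_alt filename
instance (filename : String) (out : Bool × String) : Decidable (Spec_is_supported_media_file filename out) := by unfold Spec_is_supported_media_file; infer_instance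

-- ===== CLAIM (what is proved, stated in full; the proofs are below) =====
def Claim_equal_is_supported_media_file : Prop := ∀ (filename : String), Dom_is_supported_media_file filename → Spec_is_supported_media_file filename (is_supported_media_file filename)

-- ===== LEMMAS AND PROOFS =====

-- A's body, expressed on the char list of the lowered filename
def pvACore (ls : List Char) : Bool × String :=
  if pvImageExts.any (fun ext => PySem.Chars.endswith ls ext.toList) then (true, "image")
  else if pvVideoExts.any (fun ext => PySem.Chars.endswith ls ext.toList) then (true, "video")
  else if pvAudioExts.any (fun ext => PySem.Chars.endswith ls ext.toList) then (true, "audio")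
  else (false, "unknown")

theorem pvA_eq_core (filename : String) :
    is_supported_media_file filename = pvACore (PySem.Chars.lower filename.toList) := by
  simp [is_supported_media_file, pvACore, pvImageExts, pvVideoExts, pvAudioExts]

-- a dotted extension is a suffix of u ++ '.'::acc (tail and acc dot-free) iff its tail is exactly acc
theorem pv_suffix_dot_iff (u tail acc : List Char) (ht : '.' ∉ tail) (ha : '.' ∉ acc) :
    ('.' :: tail) <:+ (u ++ '.' :: acc) ↔ tail = acc := by
  constructor
  · intro h
    have h2 : ('.' :: acc) <:+ (u ++ '.' :: acc) := List.suffix_append u ('.' :: acc)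
    rcases List.suffix_or_suffix_of_suffix h h2 with h3 | h3
    · rcases h3 with ⟨p, hp⟩
      cases p with
      | nil => simpa using hp
      | cons q qs =>
        have : acc = qs ++ '.' :: tail := (by simpa using hp.symm : _ ∧ _).2
        exact absurd (by simp [this]) ha
    · rcases h3 with ⟨p, hp⟩
      cases p with
      | nil => simpa using hp.symm
      | cons q qs =>
        have : tail = qs ++ '.' :: acc := (by simpa using hp.symm : _ ∧ _).2
        exact absurd (by simp [this]) ht
  · intro h
    subst h
    exact List.suffix_append _ _

-- a dotted extension is never a suffix of a dot-free list
theorem pv_not_suffix_dotfree (tail acc : List Char) (ha : '.' ∉ acc) :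
    ¬ ('.' :: tail) <:+ acc := fun h => ha (h.subset (by simp))

theorem pvACore_dotfree (acc : List Char) (ha : '.' ∉ acc) : pvACore acc = (false, "unknown") := by
  have hE : ∀ t : List Char, PySem.Chars.endswith acc ('.' :: t) = false := by
    intro t
    rw [Bool.eq_false_iff]
    intro hh
    exact pv_not_suffix_dotfree t acc ha ((PySem.Chars.endswith_iff _ _).mp hh)
  simp only [pvACore, pvImageExts, pvVideoExts, pvAudioExts, List.any_cons, List.any_nil,
    String.reduceToList, hE]
  simp

-- string BEq against a built string, as list equality
theorem pv_str_beq (e : String) (l : List Char) :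
    (e == String.ofList l) = decide (l = e.toList) := by
  by_cases h : l = e.toList
  · subst h
    simp
  · simp only [h, decide_false, beq_eq_false_iff_ne, ne_eq]
    intro hh
    exact h (by simpa using congrArg String.toList hh.symm)

-- on a string whose last dot is followed exactly by acc, A's classification equals B's dict lookup
theorem pvACore_dot (u acc : List Char) (ha : '.' ∉ acc) :
    pvACore (u ++ '.' :: acc) =
      (match pvExtToType.get? (String.ofList ('.' :: acc)) with
       | some t => (true, t)
       | none => (false, "unknown")) := by
  have hE : ∀ t : List Char, '.' ∉ t →
      PySem.Chars.endswith (u ++ '.' :: acc) ('.' :: t) = decide (acc = t) := by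
    intro t ht
    by_cases h : acc = t
    · subst h
      simp [(PySem.Chars.endswith_iff _ _).mpr ((pv_suffix_dot_iff u acc acc ht ha).mpr rfl)]
    · simp only [h, decide_false, Bool.eq_false_iff]
      intro hh
      exact h ((pv_suffix_dot_iff u t acc ht ha).mp ((PySem.Chars.endswith_iff _ _).mp hh)).symm
  simp only [pvACore, pvImageExts, pvVideoExts, pvAudioExts, List.any_cons, List.any_nil,
    String.reduceToList,
    hE ['j','p','g'] (by decide), hE ['j','p','e','g'] (by decide), hE ['p','n','g'] (by decide),
    hE ['g','i','f'] (by decide), hE ['w','e','b','p'] (by decide), hE ['s','v','g'] (by decide),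
    hE ['m','p','4'] (by decide), hE ['m','o','v'] (by decide), hE ['a','v','i'] (by decide),
    hE ['w','e','b','m'] (by decide), hE ['m','p','3'] (by decide), hE ['w','a','v'] (by decide),
    hE ['o','g','g'] (by decide),
    pvExtToType, PySem.Dict.get?_mk_cons, pv_str_beq]
  by_cases h1 : acc = ['j','p','g']; · subst h1; decide
  by_cases h2 : acc = ['j','p','e','g']; · subst h2; decide
  by_cases h3 : acc = ['p','n','g']; · subst h3; decide
  by_cases h4 : acc = ['g','i','f']; · subst h4; decide
  by_cases h5 : acc = ['w','e','b','p']; · subst h5; decide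
  by_cases h6 : acc = ['s','v','g']; · subst h6; decide
  by_cases h7 : acc = ['m','p','4']; · subst h7; decide
  by_cases h8 : acc = ['m','o','v']; · subst h8; decide
  by_cases h9 : acc = ['a','v','i']; · subst h9; decide
  by_cases h10 : acc = ['w','e','b','m']; · subst h10; decide
  by_cases h11 : acc = ['m','p','3']; · subst h11; decide
  by_cases h12 : acc = ['w','a','v']; · subst h12; decide
  by_cases h13 : acc = ['o','g','g']; · subst h13; decide
  simp [h1, h2, h3, h4, h5, h6, h7, h8, h9, h10, h11, h12, h13, PySem.Dict.get?]

-- loop invariant for Source B's loop: scanning the reverse of the input with a dot-free acc computes A's answer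
theorem pvScanRev_eq (rs acc : List Char) (ha : '.' ∉ acc) :
    pvScanRev rs acc = pvACore (rs.reverse ++ acc) := by
  induction rs generalizing acc with
  | nil => simp [pvScanRev, pvACore_dotfree acc ha]
  | cons c rest ih =>
    by_cases hc : c = '.'
    · subst hc
      rw [show ('.' :: rest).reverse ++ acc = rest.reverse ++ '.' :: acc by simp]
      rw [pvACore_dot rest.reverse acc ha]
      simp [pvScanRev]
    · have hacc : '.' ∉ c :: acc := by
        intro hm
        rcases List.mem_cons.mp hm with h | h
        · exact hc h.symm
        · exact ha h
      rw [show (c :: rest).reverse ++ acc = rest.reverse ++ (c :: acc) by simp]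
      rw [← ih (c :: acc) hacc]
      simp [pvScanRev, hc]

-- ===== VERDICT (by name: the statement is the Claim_ definition above) =====
theorem is_supported_media_file_spec : Claim_equal_is_supported_media_file := by
  intro filename _
  unfold Spec_is_supported_media_file
  rw [pvA_eq_core]
  have h := pvScanRev_eq (PySem.Chars.lower filename.toList).reverse [] (by simp)
  simp only [List.reverse_reverse, List.append_nil] at h
  rw [← h]
  simp [is_supported_media_file_alt]
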